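-- pv_equiv track=rewrite | github.com/nkartashov/advent_of_code | 2023/1/main.py | find_digits
-- ===== SOURCE A (Python) =====
-- DIGITS = {
--     '0': 0,
--     '1': 1,
--     '2': 2,
--     '3': 3,
--     '4': 4,
--     '5': 5,
--     '6': 6,
--     '7': 7,
--     '8': 8,
--     '9': 9,
--     'one': 1,
--     "two": 2,
--     "three": 3,
--     "four": 4,
--     "five": 5,
--     "six": 6,
--     "seven": 7,
--     "eight": 8,
--     "nine": 9,
-- }
--
-- def find_digits(line: str) -> list[int]:
--     res = []
--     i = 0
--     while i < len(line):
--         for d in DIGITS: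
--             if line[i:].startswith(d):
--                 res.append(DIGITS[d])
--                 break
--         i += 1
--
--     return res
-- ===== SOURCE B (Python) =====
-- WORDS = {
--     'one': 1, 'two': 2, 'three': 3, 'four': 4, 'five': 5,
--     'six': 6, 'seven': 7, 'eight': 8, 'nine': 9,
-- }
--
--
-- def find_digits(line: str) -> list[int]:
--     # Collect (position, value) hits: one pass for digit characters, then one
--     # find-loop per spelled-out digit; sort by position and drop the positions.
--     hits = [(i, ord(c) - 48) for i, c in enumerate(line) if '0' <= c <= '9']
--     for word, value in WORDS.items():
--         start = line.find(word)
--         while start != -1: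
--             hits.append((start, value))
--             start = line.find(word, start + 1)
--     hits.sort(key=lambda h: h[0])
--     return [v for _, v in hits]
-- ===== Notes on version B (the rewrite author's own statement) =====
-- stated objective: faster
-- what changed: A scans every position and tries all 19 dict keys at each via slicing+startswith; B collects (position, value) hits with one digit-character pass plus a str.find loop per spelled word, then sorts the hits by position and projects the values.
import Mathlib
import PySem

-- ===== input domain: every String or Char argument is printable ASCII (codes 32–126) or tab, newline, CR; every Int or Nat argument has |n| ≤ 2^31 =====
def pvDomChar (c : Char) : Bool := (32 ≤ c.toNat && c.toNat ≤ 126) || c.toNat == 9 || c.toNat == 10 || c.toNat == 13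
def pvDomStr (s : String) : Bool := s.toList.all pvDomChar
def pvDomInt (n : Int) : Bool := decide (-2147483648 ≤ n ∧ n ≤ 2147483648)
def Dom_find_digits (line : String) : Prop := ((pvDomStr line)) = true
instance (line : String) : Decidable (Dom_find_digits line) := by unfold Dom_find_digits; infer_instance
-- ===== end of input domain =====

-- B replaces A's position-outer / dict-key-inner double loop by independent occurrence
-- scans (one digit-character pass plus one find-loop per word) merged by a sort on position
-- (measured faster: per-position Python-level key loop becomes a few str.find scans plus a sort).

-- ===== PORT A =====
-- DIGITS in insertion order
def pvDigitsA : List (String × Int) :=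
  [("0",0),("1",1),("2",2),("3",3),("4",4),("5",5),("6",6),("7",7),("8",8),("9",9),
   ("one",1),("two",2),("three",3),("four",4),("five",5),("six",6),("seven",7),("eight",8),("nine",9)]

-- the inner 'for d in DIGITS: if line[i:].startswith(d): … break' — first matching key's value
def pvFirstKey (cs : List Char) : List (String × Int) → Option Int
  | [] => none
  | p :: rest => if PySem.Chars.startswith cs p.1.toList then some p.2 else pvFirstKey cs rest

-- the 'while i < len(line)' loop: the suffix c :: rest is line[i:]
def pvLoopA : List Char → List Int
  | [] => []
  | c :: rest =>
    match pvFirstKey (c :: rest) pvDigitsA with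
    | some v => v :: pvLoopA rest
    | none => pvLoopA rest

def find_digits (line : String) : List Int := pvLoopA line.toList

-- ===== PORT B =====
def pvWordsB : List (String × Int) :=
  [("one",1),("two",2),("three",3),("four",4),("five",5),("six",6),("seven",7),("eight",8),("nine",9)]

-- the comprehension '[(i, ord(c) - 48) for i, c in enumerate(line) if '0' <= c <= '9']'
def pvDigitScan : Nat → List Char → List (Int × Int)
  | _, [] => []
  | i, c :: rest =>
    if '0' ≤ c ∧ c ≤ '9' then ((i : Int), (c.toNat : Int) - 48) :: pvDigitScan (i + 1) rest
    else pvDigitScan (i + 1) rest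

-- the find-loop for one word: 'line.find(word, start)' visits exactly the positions where
-- the word starts, in increasing order; the scan records the same (position, value) hits.
def pvWordScan (w : List Char) (v : Int) : Nat → List Char → List (Int × Int)
  | _, [] => []
  | i, c :: rest =>
    if PySem.Chars.startswith (c :: rest) w then ((i : Int), v) :: pvWordScan w v (i + 1) rest
    else pvWordScan w v (i + 1) rest

def find_digits_alt (line : String) : List Int :=
  let hits := pvDigitScan 0 line.toList ++
    pvWordsB.flatMap (fun p => pvWordScan p.1.toList p.2 0 line.toList)
  (PySem.List.sorted hits (fun h => h.1)).map (fun h => h.2)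

-- ===== PRECONDITION & SPEC =====
def Spec_find_digits (line : String) (out : List Int) : Prop := out = find_digits_alt line
instance (line : String) (out : List Int) : Decidable (Spec_find_digits line out) := by unfold Spec_find_digits; infer_instance

-- ===== CLAIM (what is proved, stated in full; the proofs are below) =====
def Claim_equal_find_digits : Prop := ∀ (line : String), Dom_find_digits line → Spec_find_digits line (find_digits line)

-- ===== LEMMAS AND PROOFS =====

-- the first ten entries of DIGITS
def pvDigitPairs : List (String × Int) :=
  [("0",0),("1",1),("2",2),("3",3),("4",4),("5",5),("6",6),("7",7),("8",8),("9",9)]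

-- canonical hit list: one (position, value) per position at which A records a value
def pvCanon : Nat → List Char → List (Int × Int)
  | _, [] => []
  | i, c :: rest =>
    match pvFirstKey (c :: rest) pvDigitsA with
    | some v => ((i : Int), v) :: pvCanon (i + 1) rest
    | none => pvCanon (i + 1) rest

lemma pvLoopA_eq_map_canon (cs : List Char) (i : Nat) :
    pvLoopA cs = (pvCanon i cs).map (fun h => h.2) := by
  induction cs generalizing i with
  | nil => rfl
  | cons c rest ih =>
    simp only [pvLoopA, pvCanon]
    cases pvFirstKey (c :: rest) pvDigitsA with
    | none => exact ih (i + 1)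
    | some v => simp [ih (i + 1)]

lemma pvCanon_fst_ge (cs : List Char) (i : Nat) :
    ∀ p ∈ pvCanon i cs, (i : Int) ≤ p.1 := by
  induction cs generalizing i with
  | nil => simp [pvCanon]
  | cons c rest ih =>
    simp only [pvCanon]
    cases pvFirstKey (c :: rest) pvDigitsA with
    | none =>
      intro p hp
      have := ih (i + 1) p hp
      push_cast at this ⊢; omega
    | some v =>
      intro p hp
      rcases List.mem_cons.mp hp with h | h
      · subst h; simp
      · have := ih (i + 1) p h
        push_cast at this ⊢; omega

lemma pvCanon_pairwise (cs : List Char) (i : Nat) :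
    (pvCanon i cs).Pairwise (fun a b => a.1 < b.1) := by
  induction cs generalizing i with
  | nil => simp [pvCanon]
  | cons c rest ih =>
    simp only [pvCanon]
    cases pvFirstKey (c :: rest) pvDigitsA with
    | none => exact ih (i + 1)
    | some v =>
      refine List.Pairwise.cons ?_ (ih (i + 1))
      intro p hp
      have := pvCanon_fst_ge rest (i + 1) p hp
      push_cast at this ⊢; omega

lemma pvDigitsA_split : pvDigitsA = pvDigitPairs ++ pvWordsB := rfl

lemma pvFirstKey_append (cs : List Char) (l1 l2 : List (String × Int)) :
    pvFirstKey cs (l1 ++ l2) = (pvFirstKey cs l1).or (pvFirstKey cs l2) := by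
  induction l1 with
  | nil => rfl
  | cons p t ih =>
    simp only [List.cons_append, pvFirstKey]
    by_cases h : PySem.Chars.startswith cs p.1.toList
    · simp [h]
    · simp [h, ih]

lemma pvStartswith_single (c k : Char) (rest : List Char) :
    PySem.Chars.startswith (c :: rest) [k] = (k == c) := by
  simp [PySem.Chars.startswith, List.isPrefixOf]

lemma pvFirstKey_digits (c : Char) (rest : List Char) :
    pvFirstKey (c :: rest) pvDigitPairs =
      if '0' ≤ c ∧ c ≤ '9' then some ((c.toNat : Int) - 48) else none := by
  have hnat : ∀ k : Char, (k == c) = true ↔ k.toNat = c.toNat := by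
    intro k
    simp only [beq_iff_eq]
    constructor
    · rintro rfl; rfl
    · intro h; exact Char.ext_iff.mpr (UInt32.toNat_inj.mp h)
  have hle : ('0' ≤ c ∧ c ≤ '9') ↔ (48 ≤ c.toNat ∧ c.toNat ≤ 57) := by
    simp only [Char.le_def, UInt32.le_iff_toNat_le]
    exact Iff.rfl
  have h0 : "0".toList = ['0'] := rfl
  have h1 : "1".toList = ['1'] := rfl
  have h2 : "2".toList = ['2'] := rfl
  have h3 : "3".toList = ['3'] := rfl
  have h4 : "4".toList = ['4'] := rfl
  have h5 : "5".toList = ['5'] := rfl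
  have h6 : "6".toList = ['6'] := rfl
  have h7 : "7".toList = ['7'] := rfl
  have h8 : "8".toList = ['8'] := rfl
  have h9 : "9".toList = ['9'] := rfl
  simp only [pvDigitPairs, pvFirstKey, h0,h1,h2,h3,h4,h5,h6,h7,h8,h9, pvStartswith_single]
  by_cases e0 : ('0' == c) = true
  · have h : c.toNat = 48 := by
      have h' := (hnat '0').mp e0
      have hv2 : ('0' : Char).toNat = 48 := by decide
      omega
    rw [if_pos e0, if_pos (hle.mpr (by omega))]
    rw [h]; norm_num
  rw [if_neg e0]
  by_cases e1 : ('1' == c) = true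
  · have h : c.toNat = 49 := by
      have h' := (hnat '1').mp e1
      have hv2 : ('1' : Char).toNat = 49 := by decide
      omega
    rw [if_pos e1, if_pos (hle.mpr (by omega))]
    rw [h]; norm_num
  rw [if_neg e1]
  by_cases e2 : ('2' == c) = true
  · have h : c.toNat = 50 := by
      have h' := (hnat '2').mp e2
      have hv2 : ('2' : Char).toNat = 50 := by decide
      omega
    rw [if_pos e2, if_pos (hle.mpr (by omega))]
    rw [h]; norm_num
  rw [if_neg e2]
  by_cases e3 : ('3' == c) = true
  · have h : c.toNat = 51 := by
      have h' := (hnat '3').mp e3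
      have hv2 : ('3' : Char).toNat = 51 := by decide
      omega
    rw [if_pos e3, if_pos (hle.mpr (by omega))]
    rw [h]; norm_num
  rw [if_neg e3]
  by_cases e4 : ('4' == c) = true
  · have h : c.toNat = 52 := by
      have h' := (hnat '4').mp e4
      have hv2 : ('4' : Char).toNat = 52 := by decide
      omega
    rw [if_pos e4, if_pos (hle.mpr (by omega))]
    rw [h]; norm_num
  rw [if_neg e4]
  by_cases e5 : ('5' == c) = true
  · have h : c.toNat = 53 := by
      have h' := (hnat '5').mp e5
      have hv2 : ('5' : Char).toNat = 53 := by decide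
      omega
    rw [if_pos e5, if_pos (hle.mpr (by omega))]
    rw [h]; norm_num
  rw [if_neg e5]
  by_cases e6 : ('6' == c) = true
  · have h : c.toNat = 54 := by
      have h' := (hnat '6').mp e6
      have hv2 : ('6' : Char).toNat = 54 := by decide
      omega
    rw [if_pos e6, if_pos (hle.mpr (by omega))]
    rw [h]; norm_num
  rw [if_neg e6]
  by_cases e7 : ('7' == c) = true
  · have h : c.toNat = 55 := by
      have h' := (hnat '7').mp e7
      have hv2 : ('7' : Char).toNat = 55 := by decide
      omega
    rw [if_pos e7, if_pos (hle.mpr (by omega))]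
    rw [h]; norm_num
  rw [if_neg e7]
  by_cases e8 : ('8' == c) = true
  · have h : c.toNat = 56 := by
      have h' := (hnat '8').mp e8
      have hv2 : ('8' : Char).toNat = 56 := by decide
      omega
    rw [if_pos e8, if_pos (hle.mpr (by omega))]
    rw [h]; norm_num
  rw [if_neg e8]
  by_cases e9 : ('9' == c) = true
  · have h : c.toNat = 57 := by
      have h' := (hnat '9').mp e9
      have hv2 : ('9' : Char).toNat = 57 := by decide
      omega
    rw [if_pos e9, if_pos (hle.mpr (by omega))]
    rw [h]; norm_num
  rw [if_neg e9]
  have n0 : c.toNat ≠ 48 := fun hh => e0 ((hnat '0').mpr (by rw [hh]; decide))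
  have n1 : c.toNat ≠ 49 := fun hh => e1 ((hnat '1').mpr (by rw [hh]; decide))
  have n2 : c.toNat ≠ 50 := fun hh => e2 ((hnat '2').mpr (by rw [hh]; decide))
  have n3 : c.toNat ≠ 51 := fun hh => e3 ((hnat '3').mpr (by rw [hh]; decide))
  have n4 : c.toNat ≠ 52 := fun hh => e4 ((hnat '4').mpr (by rw [hh]; decide))
  have n5 : c.toNat ≠ 53 := fun hh => e5 ((hnat '5').mpr (by rw [hh]; decide))
  have n6 : c.toNat ≠ 54 := fun hh => e6 ((hnat '6').mpr (by rw [hh]; decide))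
  have n7 : c.toNat ≠ 55 := fun hh => e7 ((hnat '7').mpr (by rw [hh]; decide))
  have n8 : c.toNat ≠ 56 := fun hh => e8 ((hnat '8').mpr (by rw [hh]; decide))
  have n9 : c.toNat ≠ 57 := fun hh => e9 ((hnat '9').mpr (by rw [hh]; decide))
  rw [if_neg (by rw [hle]; omega)]

lemma pvFirstKey_eq_none_iff (cs : List Char) (l : List (String × Int)) :
    pvFirstKey cs l = none ↔ ∀ p ∈ l, PySem.Chars.startswith cs p.1.toList = false := by
  induction l with
  | nil => simp [pvFirstKey]
  | cons p t ih =>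
    simp only [pvFirstKey]
    by_cases h : PySem.Chars.startswith cs p.1.toList
    · simp [h]
    · simp [h, ih]

lemma pvFirstKey_some_mem (cs : List Char) (l : List (String × Int)) (v : Int)
    (h : pvFirstKey cs l = some v) :
    ∃ p, p ∈ l ∧ PySem.Chars.startswith cs p.1.toList = true ∧ p.2 = v := by
  induction l with
  | nil => simp [pvFirstKey] at h
  | cons p t ih =>
    simp only [pvFirstKey] at h
    by_cases hs : PySem.Chars.startswith cs p.1.toList
    · rw [if_pos hs] at h
      exact ⟨p, by simp, hs, by injection h⟩
    · rw [if_neg hs] at h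
      obtain ⟨q, hq, hq2, hq3⟩ := ih h
      exact ⟨q, by simp [hq], hq2, hq3⟩

lemma pvWords_ne_nil : ∀ p ∈ pvWordsB, p.1.toList ≠ [] := by decide

lemma pvWords_head_not_digit :
    ∀ p ∈ pvWordsB, ¬('0' ≤ p.1.toList.headI ∧ p.1.toList.headI ≤ '9') := by decide

lemma pvWords_prefix_free :
    ∀ p ∈ pvWordsB, ∀ q ∈ pvWordsB, p.1.toList <+: q.1.toList → p = q := by decide

lemma pvWords_nodup : pvWordsB.Nodup := by decide

lemma pvFlatMap_one_fire {α : Type} (l : List α) (F G : α → List (Int × Int)) (P : α → Bool)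
    (a : Int × Int)
    (hF : ∀ p ∈ l, F p = if P p then a :: G p else G p)
    (x : α) (hx : x ∈ l) (hPx : P x = true)
    (huniq : ∀ q ∈ l, P q = true → q = x)
    (hnodup : l.Nodup) :
    (l.flatMap F).Perm (a :: l.flatMap G) := by
  induction l with
  | nil => cases hx
  | cons p t ih =>
    have hnd := List.nodup_cons.mp hnodup
    simp only [List.flatMap_cons]
    by_cases hpx : p = x
    · subst hpx
      rw [hF p List.mem_cons_self]
      simp only [hPx, if_true]
      have ht : ∀ q ∈ t, F q = G q := by
        intro q hq
        have hPq : P q = false := by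
          by_contra hc
          have hqp := huniq q (List.mem_cons_of_mem _ hq) (by simpa using hc)
          exact hnd.1 (hqp ▸ hq)
        rw [hF q (List.mem_cons_of_mem _ hq), hPq]
        simp
      rw [List.flatMap_congr ht]
      simp
    · have hx' : x ∈ t := by
        rcases List.mem_cons.mp hx with h | h
        · exact absurd h.symm hpx
        · exact h
      have hPp : P p = false := by
        by_contra hc
        exact hpx (huniq p List.mem_cons_self (by simpa using hc))
      rw [hF p List.mem_cons_self, hPp]
      simp only [Bool.false_eq_true, if_false]
      have hperm := ih (fun q hq => hF q (List.mem_cons_of_mem _ hq)) hx'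
        (fun q hq h => huniq q (List.mem_cons_of_mem _ hq) h) hnd.2
      exact (hperm.append_left (G p)).trans List.perm_middle

lemma pvNoWord_of_digit (c : Char) (rest : List Char) (hd : '0' ≤ c ∧ c ≤ '9') :
    ∀ p ∈ pvWordsB, PySem.Chars.startswith (c :: rest) p.1.toList = false := by
  intro p hp
  have hne := pvWords_ne_nil p hp
  have hhd := pvWords_head_not_digit p hp
  cases hpl : p.1.toList with
  | nil => exact absurd hpl hne
  | cons c0 w' =>
    rw [hpl] at hhd
    simp only [List.headI] at hhd
    by_contra hc
    have hpre : (c0 :: w') <+: (c :: rest) :=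
      (PySem.Chars.startswith_iff _ _).mp (by simpa using hc)
    obtain ⟨t, ht⟩ := hpre
    have hc0 : c0 = c := by injection ht
    exact hhd (hc0 ▸ hd)

theorem pvMain_perm (cs : List Char) (i : Nat) :
    (pvDigitScan i cs ++
      pvWordsB.flatMap (fun p => pvWordScan p.1.toList p.2 i cs)).Perm (pvCanon i cs) := by
  induction cs generalizing i with
  | nil => simp [pvDigitScan, pvWordScan, pvCanon]
  | cons c rest ih =>
    by_cases hd : '0' ≤ c ∧ c ≤ '9'
    · -- a digit character: no word starts here, A's first key is the digit key
      have hfw : pvWordsB.flatMap (fun p => pvWordScan p.1.toList p.2 i (c :: rest)) =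
          pvWordsB.flatMap (fun p => pvWordScan p.1.toList p.2 (i + 1) rest) := by
        refine List.flatMap_congr ?_
        intro p hp
        simp only [pvWordScan, pvNoWord_of_digit c rest hd p hp, Bool.false_eq_true, if_false]
      have hcanon : pvFirstKey (c :: rest) pvDigitsA = some ((c.toNat : Int) - 48) := by
        rw [pvDigitsA_split, pvFirstKey_append, pvFirstKey_digits, if_pos hd]
        rfl
      simp only [pvDigitScan, if_pos hd, hfw, pvCanon, hcanon, List.cons_append]
      exact (ih (i + 1)).cons _
    · have hdig : pvFirstKey (c :: rest) pvDigitPairs = none := by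
        rw [pvFirstKey_digits, if_neg hd]
      have hcanon : pvFirstKey (c :: rest) pvDigitsA = pvFirstKey (c :: rest) pvWordsB := by
        rw [pvDigitsA_split, pvFirstKey_append, hdig]
        rfl
      simp only [pvDigitScan, if_neg hd]
      cases hk : pvFirstKey (c :: rest) pvWordsB with
      | none =>
        have hnone := (pvFirstKey_eq_none_iff (c :: rest) pvWordsB).mp hk
        have hfw : pvWordsB.flatMap (fun p => pvWordScan p.1.toList p.2 i (c :: rest)) =
            pvWordsB.flatMap (fun p => pvWordScan p.1.toList p.2 (i + 1) rest) := by
          refine List.flatMap_congr ?_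
          intro p hp
          simp only [pvWordScan, hnone p hp, Bool.false_eq_true, if_false]
        simp only [hfw, pvCanon, hcanon, hk]
        exact ih (i + 1)
      | some v =>
        obtain ⟨p0, hp0mem, hp0s, hp0v⟩ := pvFirstKey_some_mem _ _ _ hk
        have huniq : ∀ q ∈ pvWordsB,
            PySem.Chars.startswith (c :: rest) q.1.toList = true → q = p0 := by
          intro q hq hqs
          have hq' : q.1.toList <+: (c :: rest) := (PySem.Chars.startswith_iff _ _).mp hqs
          have hp' : p0.1.toList <+: (c :: rest) := (PySem.Chars.startswith_iff _ _).mp hp0s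
          rcases List.prefix_or_prefix_of_prefix hq' hp' with h | h
          · exact pvWords_prefix_free q hq p0 hp0mem h
          · exact (pvWords_prefix_free p0 hp0mem q hq h).symm
        have hfire := pvFlatMap_one_fire pvWordsB
          (fun p => pvWordScan p.1.toList p.2 i (c :: rest))
          (fun p => pvWordScan p.1.toList p.2 (i + 1) rest)
          (fun p => PySem.Chars.startswith (c :: rest) p.1.toList)
          ((i : Int), v)
          (by
            intro p hp
            by_cases hs : PySem.Chars.startswith (c :: rest) p.1.toList = true
            · have hpp0 : p = p0 := huniq p hp hs
              simp only [pvWordScan, hpp0, hp0v]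
            · simp only [pvWordScan, eq_false_of_ne_true hs, Bool.false_eq_true, if_false])
          p0 hp0mem hp0s huniq pvWords_nodup
        refine ((hfire.append_left _).trans List.perm_middle).trans ?_
        simp only [pvCanon, hcanon, hk]
        exact ((ih (i + 1)).cons _)

-- ===== VERDICT (by name: the statement is the Claim_ definition above) =====
theorem find_digits_spec : Claim_equal_find_digits := by
  intro line _
  show find_digits line = find_digits_alt line
  simp only [find_digits, find_digits_alt]
  rw [PySem.List.sorted_eq_of_perm_of_pairwise_lt _ (pvCanon 0 line.toList) (fun h => h.1)
    (pvMain_perm line.toList 0).symm (pvCanon_pairwise line.toList 0)]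
  exact pvLoopA_eq_map_canon line.toList 0
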